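-- pv_equiv track=rewrite | github.com/AjeeAI/mols-otp | Finalized code for project(Updated).py | print_superimposition_equivalent
-- ===== SOURCE A (Python) =====
-- def print_superimposition_equivalent(latin_squares, chosen_ls_index, chosen_row_index, next_ls_index):
--     chosen_ls = latin_squares[chosen_ls_index]
--     next_ls = latin_squares[next_ls_index]
--
--     chosen_row = chosen_ls[chosen_row_index]
--     next_row = next_ls[chosen_row_index]  # Superimpose with the row at the same index in the next Latin square
--
--     # Superimpose the chosen row with the next row
--     superimposition = [(chosen_row[i], next_row[i]) for i in range(len(chosen_row))]
--
--     # Flatten the superimposition to digits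
--     flattened_superimposition = flatten_to_digits(superimposition)
--
--     return flattened_superimposition
--
-- def flatten_to_digits(auth):
--     flattened = []
--     for item in auth:
--         if isinstance(item, tuple):
--             flattened.extend(flatten_to_digits(item))
--         else:
--             flattened.extend([int(digit) for digit in str(item)])
--     return flattened
-- ===== SOURCE B (Python) =====
-- def _digits(n):
--     # arithmetic base-10 expansion, most significant digit first
--     if n < 10:
--         return [n]
--     return _digits(n // 10) + [n % 10]
--
-- def print_superimposition_equivalent(latin_squares, chosen_ls_index, chosen_row_index, next_ls_index):
--     chosen_row = latin_squares[chosen_ls_index][chosen_row_index]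
--     next_row = latin_squares[next_ls_index][chosen_row_index]
--     out = []
--     for i in range(len(chosen_row)):
--         out += _digits(chosen_row[i])
--         out += _digits(next_row[i])
--     return out
-- ===== Notes on version B (the rewrite author's own statement) =====
-- stated objective: simpler
-- what changed: Replaced the pair-list plus recursive str()-based flatten with one loop that emits each element's digits directly via arithmetic divmod expansion (no tuples, no string conversion).
import Mathlib
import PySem

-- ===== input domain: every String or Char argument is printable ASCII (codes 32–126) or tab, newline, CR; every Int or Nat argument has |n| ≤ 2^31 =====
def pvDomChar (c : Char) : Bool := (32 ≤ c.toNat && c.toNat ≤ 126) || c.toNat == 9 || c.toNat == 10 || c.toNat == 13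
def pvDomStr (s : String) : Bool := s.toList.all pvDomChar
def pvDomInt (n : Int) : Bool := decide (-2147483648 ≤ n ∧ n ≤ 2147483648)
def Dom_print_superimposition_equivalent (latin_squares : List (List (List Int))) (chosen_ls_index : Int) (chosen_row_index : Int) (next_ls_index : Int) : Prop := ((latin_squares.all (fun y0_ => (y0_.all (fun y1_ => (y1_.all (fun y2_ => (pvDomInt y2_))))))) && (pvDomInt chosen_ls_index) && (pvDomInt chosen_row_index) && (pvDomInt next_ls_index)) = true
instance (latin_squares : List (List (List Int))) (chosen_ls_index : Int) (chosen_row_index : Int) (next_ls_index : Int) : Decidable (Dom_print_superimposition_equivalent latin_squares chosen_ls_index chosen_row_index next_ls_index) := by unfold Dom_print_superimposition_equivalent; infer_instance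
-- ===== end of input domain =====

-- ===== PORT A =====
-- B replaces A's pair-list + recursive str()-based flatten by a single loop emitting
-- digits via arithmetic base-10 expansion (objective: simpler).

-- int(str-of-one-char) as A's inner comprehension computes it (default 0 only outside Pre_)
def pvChVal (c : Char) : Int := (PySem.Int.ofStr? (String.ofList [c])).getD 0

-- [int(digit) for digit in str(item)]
def pvStrDigits (x : Int) : List Int := (PySem.Int.toStr x).toList.map pvChVal

-- flatten_to_digits applied to one tuple (chosen_row[i], next_row[i]): its items are ints
def pvFlattenPair (p : Int × Int) : List Int :=
  [p.1, p.2].foldl (fun fl item => fl ++ pvStrDigits item) []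

-- flatten_to_digits on the superimposition list: every item is a tuple
def pvFlatten (auth : List (Int × Int)) : List Int :=
  auth.foldl (fun fl item => fl ++ pvFlattenPair item) []

def print_superimposition_equivalent (latin_squares : List (List (List Int))) (chosen_ls_index : Int) (chosen_row_index : Int) (next_ls_index : Int) : List Int :=
  let chosen_ls := (PySem.List.pyGet? latin_squares chosen_ls_index).getD []
  let next_ls := (PySem.List.pyGet? latin_squares next_ls_index).getD []
  let chosen_row := (PySem.List.pyGet? chosen_ls chosen_row_index).getD []
  let next_row := (PySem.List.pyGet? next_ls chosen_row_index).getD []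
  let superimposition := (List.range chosen_row.length).map
    (fun i => (chosen_row.getD i 0, next_row.getD i 0))
  pvFlatten superimposition

-- ===== PORT B =====
-- _digits: arithmetic base-10 expansion, most significant first
def pvDigitsB (n : Int) : List Int :=
  if _h : n < 10 then [n]
  else pvDigitsB (PySem.Int.floordiv n 10) ++ [PySem.Int.mod n 10]
termination_by n.toNat
decreasing_by
  simp only [PySem.Int.floordiv]
  rw [Int.fdiv_eq_ediv_of_nonneg _ (by omega)]
  omega

def print_superimposition_equivalent_alt (latin_squares : List (List (List Int))) (chosen_ls_index : Int) (chosen_row_index : Int) (next_ls_index : Int) : List Int :=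
  let chosen_row := (PySem.List.pyGet? ((PySem.List.pyGet? latin_squares chosen_ls_index).getD []) chosen_row_index).getD []
  let next_row := (PySem.List.pyGet? ((PySem.List.pyGet? latin_squares next_ls_index).getD []) chosen_row_index).getD []
  (List.range chosen_row.length).foldl
    (fun out i => out ++ pvDigitsB (chosen_row.getD i 0) ++ pvDigitsB (next_row.getD i 0)) []

-- ===== PRECONDITION & SPEC =====
-- Pre_ holds exactly where A returns: all four indexings succeed (Python negative
-- indexing included), next_row is long enough, and every element read is nonnegative
-- (str() of a negative int yields a '-' on which A's int(digit) raises ValueError).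
def Pre_print_superimposition_equivalent (latin_squares : List (List (List Int))) (chosen_ls_index : Int) (chosen_row_index : Int) (next_ls_index : Int) : Prop :=
  let cls := (PySem.List.pyGet? latin_squares chosen_ls_index).getD []
  let nls := (PySem.List.pyGet? latin_squares next_ls_index).getD []
  let crow := (PySem.List.pyGet? cls chosen_row_index).getD []
  let nrow := (PySem.List.pyGet? nls chosen_row_index).getD []
  (PySem.List.pyGet? latin_squares chosen_ls_index).isSome = true ∧
  (PySem.List.pyGet? latin_squares next_ls_index).isSome = true ∧
  (PySem.List.pyGet? cls chosen_row_index).isSome = true ∧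
  (PySem.List.pyGet? nls chosen_row_index).isSome = true ∧
  crow.length ≤ nrow.length ∧ (∀ x ∈ crow, 0 ≤ x) ∧ (∀ x ∈ nrow.take crow.length, 0 ≤ x)
instance (latin_squares : List (List (List Int))) (chosen_ls_index : Int) (chosen_row_index : Int) (next_ls_index : Int) : Decidable (Pre_print_superimposition_equivalent latin_squares chosen_ls_index chosen_row_index next_ls_index) := by
  unfold Pre_print_superimposition_equivalent; infer_instance

def pvWitness_print_superimposition_equivalent : List (List (List Int)) × Int × Int × Int :=
  ([[[1, 23, 0], [4, 5, 6]], [[7, 8, 9], [10, 0, 305]]], 0, 1, 1)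

def Spec_print_superimposition_equivalent (latin_squares : List (List (List Int))) (chosen_ls_index : Int) (chosen_row_index : Int) (next_ls_index : Int) (out : List Int) : Prop := out = print_superimposition_equivalent_alt latin_squares chosen_ls_index chosen_row_index next_ls_index
instance (latin_squares : List (List (List Int))) (chosen_ls_index : Int) (chosen_row_index : Int) (next_ls_index : Int) (out : List Int) : Decidable (Spec_print_superimposition_equivalent latin_squares chosen_ls_index chosen_row_index next_ls_index out) := by unfold Spec_print_superimposition_equivalent; infer_instance

-- ===== CLAIM (what is proved, stated in full; the proofs are below) =====
def Claim_equal_print_superimposition_equivalent : Prop := ∀ (latin_squares : List (List (List Int))) (chosen_ls_index : Int) (chosen_row_index : Int) (next_ls_index : Int), Dom_print_superimposition_equivalent latin_squares chosen_ls_index chosen_row_index next_ls_index → Pre_print_superimposition_equivalent latin_squares chosen_ls_index chosen_row_index next_ls_index → Spec_print_superimposition_equivalent latin_squares chosen_ls_index chosen_row_index next_ls_index (print_superimposition_equivalent latin_squares chosen_ls_index chosen_row_index next_ls_index)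

-- ===== LEMMAS AND PROOFS =====

-- digit characters, most significant first, as A's str(item) produces them
def pvCharDigs (n : Nat) : List Char :=
  if _h : n < 10 then [Nat.digitChar n]
  else pvCharDigs (n / 10) ++ [Nat.digitChar (n % 10)]
decreasing_by exact Nat.div_lt_self (by omega) (by omega)

theorem pvToDigitsCore_eq (f : Nat) : ∀ (n : Nat) (l : List Char), n < f →
    Nat.toDigitsCore 10 f n l = pvCharDigs n ++ l := by
  induction f with
  | zero => intro n l h; omega
  | succ f ih =>
    intro n l h
    rw [Nat.toDigitsCore]
    by_cases h10 : n < 10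
    · have hz : n / 10 = 0 := Nat.div_eq_of_lt h10
      simp only [hz, if_pos]
      conv_rhs => rw [pvCharDigs]
      rw [dif_pos h10]
      have : n % 10 = n := Nat.mod_eq_of_lt h10
      simp [this]
    · have hne : n / 10 ≠ 0 := by omega
      simp only [if_neg hne]
      rw [ih (n / 10) _ (by omega : n / 10 < f)]
      conv_rhs => rw [pvCharDigs]
      rw [dif_neg h10]
      simp

theorem pvChVal_digitChar (d : Nat) (h : d < 10) : pvChVal (Nat.digitChar d) = (d : Int) := by
  interval_cases d <;> decide

theorem pvFloordiv_cast (n : Nat) : PySem.Int.floordiv (n : Int) 10 = ((n / 10 : Nat) : Int) := by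
  simp only [PySem.Int.floordiv]
  rw [Int.fdiv_eq_ediv_of_nonneg _ (by omega)]
  omega

theorem pvMod_cast (n : Nat) : PySem.Int.mod (n : Int) 10 = ((n % 10 : Nat) : Int) := by
  simp only [PySem.Int.mod]
  rw [Int.fmod_eq_emod]
  simp

theorem pvCharDigs_map (n : Nat) : (pvCharDigs n).map pvChVal = pvDigitsB (n : Int) := by
  induction n using Nat.strong_induction_on with
  | _ n ih =>
    by_cases h : n < 10
    · rw [pvCharDigs, dif_pos (show _ from h), pvDigitsB]
      rw [dif_pos (by exact_mod_cast h : (n : Int) < 10)]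
      simp [pvChVal_digitChar n h]
    · rw [pvCharDigs, dif_neg h]
      rw [pvDigitsB, dif_neg (by exact_mod_cast h : ¬ (n : Int) < 10)]
      rw [List.map_append, ih (n / 10) (Nat.div_lt_self (by omega) (by omega))]
      rw [pvFloordiv_cast, pvMod_cast]
      simp [pvChVal_digitChar (n % 10) (Nat.mod_lt _ (by omega))]

theorem pvStrDigits_eq (x : Int) (hx : 0 ≤ x) : pvStrDigits x = pvDigitsB x := by
  unfold pvStrDigits
  rw [PySem.Int.toList_toStr]
  unfold PySem.Int.toChars
  rw [if_neg (by omega)]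
  unfold Nat.toDigits
  rw [pvToDigitsCore_eq (x.toNat + 1) x.toNat [] (by omega), List.append_nil]
  rw [pvCharDigs_map]
  congr 1
  omega

theorem pvFold_eq (crow nrow : List Int)
    (hc : ∀ x ∈ crow, 0 ≤ x) (hn : ∀ x ∈ nrow.take crow.length, 0 ≤ x)
    (hlen : crow.length ≤ nrow.length) :
    pvFlatten ((List.range crow.length).map (fun i => (crow.getD i 0, nrow.getD i 0)))
      = (List.range crow.length).foldl
          (fun out i => out ++ pvDigitsB (crow.getD i 0) ++ pvDigitsB (nrow.getD i 0)) [] := by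
  unfold pvFlatten
  rw [List.foldl_map]
  apply PySem.List.foldl_congr_mem
  intro fl i hi
  rw [List.mem_range] at hi
  have hin : i < nrow.length := by omega
  have hit : i < (nrow.take crow.length).length := by simp; omega
  have hci : 0 ≤ crow.getD i 0 := by
    rw [List.getD_eq_getElem _ _ hi]; exact hc _ (List.getElem_mem hi)
  have hni : 0 ≤ nrow.getD i 0 := by
    rw [List.getD_eq_getElem _ _ hin, ← List.getElem_take (j := crow.length) (h := hit)]
    exact hn _ (List.getElem_mem hit)
  unfold pvFlattenPair
  simp only [List.foldl_cons, List.foldl_nil, List.nil_append]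
  rw [pvStrDigits_eq _ hci, pvStrDigits_eq _ hni, List.append_assoc]

-- ===== VERDICT (by name: the statement is the Claim_ definition above) =====
theorem print_superimposition_equivalent_spec : Claim_equal_print_superimposition_equivalent := by
  intro ls ci ri ni _ hpre
  unfold Pre_print_superimposition_equivalent at hpre
  obtain ⟨h1, h2, h3, h4, hlen, hc, hn⟩ := hpre
  unfold Spec_print_superimposition_equivalent
  unfold print_superimposition_equivalent print_superimposition_equivalent_alt
  exact pvFold_eq _ _ hc hn hlen
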